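-- pv_equiv track=rewrite | github.com/SentientPlatypus/Practice | chspc2024/p6_after.py | gen_strength
-- ===== SOURCE A (Python) =====
-- def checkorder(str):
--     q = ["e", "d", "o", "c"]
--     for i in range(len(str)):
--         if q:
--             if str[i] == q[-1]:
--                 q.pop(len(q) - 1)
--         else:
--             return True
--     if q:
--         return False
--     return True
--
-- def gen_strength(s: str):
--     checked = set()
--     strength = 0
--     for start in range(len(s)):
--         for end in range(start + 1, len(s) + 1):
--             substring = s[start:end]
--             if checkorder(substring):
--                 strength += 1
--     return strength
-- ===== SOURCE B (Python) =====
-- def gen_strength(s: str):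
--     # For each start, one greedy forward scan finds the minimal exclusive end
--     # at which "code" is completed as a subsequence; every later end also works,
--     # so add n - j + 1 endpoints.  O(n^2) instead of A's O(n^3) substring rechecks.
--     n = len(s)
--     pat = "code"
--     total = 0
--     for start in range(n):
--         j = start
--         k = 0
--         while j < n and k < 4:
--             if s[j] == pat[k]:
--                 k += 1
--             j += 1
--         if k == 4:
--             total += n - j + 1
--     return total
-- ===== Notes on version B (the rewrite author's own statement) =====
-- stated objective: faster
-- what changed: Instead of extracting every substring and re-running the stack-based subsequence check on it (A), B does one greedy forward scan per start position to find the minimal end completing the pattern as a subsequence and counts all n-j+1 valid endpoints at once.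
import Mathlib
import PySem

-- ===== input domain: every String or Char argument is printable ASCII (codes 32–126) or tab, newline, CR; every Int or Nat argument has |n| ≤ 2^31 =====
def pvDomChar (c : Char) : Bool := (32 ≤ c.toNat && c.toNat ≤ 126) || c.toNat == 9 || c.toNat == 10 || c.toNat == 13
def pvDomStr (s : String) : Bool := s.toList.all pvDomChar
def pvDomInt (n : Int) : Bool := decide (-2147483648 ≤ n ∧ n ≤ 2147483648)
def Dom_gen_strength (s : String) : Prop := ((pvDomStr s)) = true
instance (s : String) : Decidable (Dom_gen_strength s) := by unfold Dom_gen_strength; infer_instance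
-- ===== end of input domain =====

-- B replaces A's check of every substring (O(n^3)) by one greedy scan per start
-- position that finds the minimal end completing "code" as a subsequence (O(n^2)).

-- ===== PORT A =====
-- loop of checkorder: state q is the stack ['e','d','o','c'], q[-1] read, last popped
def checkorderGo : List Char → List Char → Bool
  | [], q => if q.isEmpty then true else false
  | c :: rest, q =>
    if q.isEmpty then true
    else if c == PySem.List.pyGetD q (-1) ' ' then checkorderGo rest q.dropLast
    else checkorderGo rest q

def checkorder (str : String) : Bool := checkorderGo str.toList ['e', 'd', 'o', 'c']

def gen_strength (s : String) : Int :=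
  -- `checked = set()` in A is never used; it is dropped here.
  let n : Int := PySem.Str.len s
  (PySem.List.pyRange 0 n 1).foldl (fun strength start =>
    (PySem.List.pyRange (start + 1) (n + 1) 1).foldl (fun strength end_ =>
      let substring := PySem.Str.slice s (some start) (some end_)
      if checkorder substring then strength + 1 else strength) strength) 0

-- ===== PORT B =====
-- B's inner while loop: advance j through s, k through pat, until k = 4 or j = n
def altScan (cs pat : List Char) (n j k : Nat) : Nat × Nat :=
  if _h : j < n ∧ k < 4 then
    if cs.getD j ' ' == pat.getD k ' ' then altScan cs pat n (j + 1) (k + 1)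
    else altScan cs pat n (j + 1) k
  else (j, k)
termination_by n - j

def gen_strength_alt (s : String) : Int :=
  let cs := s.toList
  let n := cs.length
  let pat := "code".toList
  (List.range n).foldl (fun total start =>
    let jk := altScan cs pat n start 0
    if jk.2 == 4 then total + ((n : Int) - (jk.1 : Int) + 1) else total) 0

-- ===== PRECONDITION & SPEC =====
def Spec_gen_strength (s : String) (out : Int) : Prop := out = gen_strength_alt s
instance (s : String) (out : Int) : Decidable (Spec_gen_strength s out) := by unfold Spec_gen_strength; infer_instance

-- ===== CLAIM (what is proved, stated in full; the proofs are below) =====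
def Claim_equal_gen_strength : Prop := ∀ (s : String), Dom_gen_strength s → Spec_gen_strength s (gen_strength s)

-- ===== LEMMAS AND PROOFS =====

-- greedy matcher: minimal number of characters of t consumed to finish pattern p
def firstEnd : List Char → List Char → Option Nat
  | _, [] => some 0
  | [], _ :: _ => none
  | c :: t, p :: ps =>
    if c = p then (firstEnd t ps).map (· + 1) else (firstEnd t (p :: ps)).map (· + 1)

def codeL : List Char := ['c', 'o', 'd', 'e']

lemma checkorderGo_eq (t : List Char) : ∀ p : List Char,
    checkorderGo t p.reverse = (firstEnd t p).isSome := by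
  induction t with
  | nil =>
    intro p; cases p with
    | nil => simp [checkorderGo, firstEnd]
    | cons x ps => simp [checkorderGo, firstEnd]
  | cons c rest ih =>
    intro p; cases p with
    | nil => simp [checkorderGo, firstEnd]
    | cons x ps =>
      have hrev : (x :: ps).reverse = ps.reverse ++ [x] := by simp
      rw [hrev]
      show checkorderGo (c :: rest) (ps.reverse ++ [x]) = _
      rw [checkorderGo]
      rw [PySem.List.pyGetD_neg_one_append_singleton]
      simp only [List.dropLast_concat]
      have hie : (ps.reverse ++ [x]).isEmpty = false := by simp
      rw [hie]
      simp only [Bool.false_eq_true, if_false]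
      by_cases hc : c = x
      · subst hc
        simp [firstEnd, ih ps, Option.isSome_map]
      · have : (c == x) = false := by simp [hc]
        simp only [this, Bool.false_eq_true, if_false]
        rw [← hrev, ih (x :: ps)]
        simp [firstEnd, hc, Option.isSome_map]

lemma firstEnd_take (t : List Char) : ∀ (p : List Char) (l : Nat),
    firstEnd (t.take l) p = (firstEnd t p).bind (fun e => if e ≤ l then some e else none) := by
  induction t with
  | nil => intro p l; cases p <;> simp [firstEnd]
  | cons c t' ih =>
    intro p l
    cases p with
    | nil => simp [firstEnd]
    | cons x ps =>
      cases l with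
      | zero =>
        simp only [List.take_zero]
        rw [firstEnd]
        rw [firstEnd]
        by_cases hc : c = x
        · rw [if_pos hc]
          cases firstEnd t' ps <;> simp
        · rw [if_neg hc]
          cases firstEnd t' (x :: ps) <;> simp
      | succ l' =>
        simp only [List.take_succ_cons]
        rw [firstEnd, firstEnd]
        by_cases hc : c = x
        · simp only [hc, if_true]
          rw [ih ps l']
          cases h : firstEnd t' ps with
          | none => simp
          | some e =>
            simp only [Option.bind_some]
            by_cases he : e ≤ l' <;> simp [he]
        · simp only [if_neg hc]
          rw [ih (x :: ps) l']
          cases h : firstEnd t' (x :: ps) with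
          | none => simp
          | some e =>
            simp only [Option.bind_some]
            by_cases he : e ≤ l' <;> simp [he]

lemma firstEnd_le_length (t : List Char) : ∀ (p : List Char) (e : Nat),
    firstEnd t p = some e → e ≤ t.length := by
  induction t with
  | nil => intro p e h; cases p <;> simp [firstEnd] at h ; omega
  | cons c t' ih =>
    intro p e h
    cases p with
    | nil => simp [firstEnd] at h; omega
    | cons x ps =>
      rw [firstEnd] at h
      by_cases hc : c = x
      · simp only [hc] at h
        cases h' : firstEnd t' ps with
        | none => simp [h'] at h
        | some e' => simp [h'] at h; have := ih ps e' h'; simp; omega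
      · simp only [if_neg hc] at h
        cases h' : firstEnd t' (x :: ps) with
        | none => simp [h'] at h
        | some e' => simp [h'] at h; have := ih (x :: ps) e' h'; simp; omega

lemma firstEnd_pos (t : List Char) : ∀ (p : List Char) (e : Nat), p ≠ [] →
    firstEnd t p = some e → 1 ≤ e := by
  induction t with
  | nil => intro p e hp h; cases p with
    | nil => exact absurd rfl hp
    | cons x ps => simp [firstEnd] at h
  | cons c t' ih =>
    intro p e hp h
    cases p with
    | nil => exact absurd rfl hp
    | cons x ps =>
      rw [firstEnd] at h
      by_cases hc : c = x <;> simp [hc] at h <;> obtain ⟨e', _, he⟩ := h <;> omega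

-- altScan computes: final j = start + (minimal consumed), final k = 4 on success
lemma altScan_spec (cs : List Char) : ∀ (j k : Nat), j ≤ cs.length → k < 4 →
    (match firstEnd (cs.drop j) (codeL.drop k) with
     | some e => altScan cs codeL cs.length j k = (j + e, 4)
     | none => (altScan cs codeL cs.length j k).1 = cs.length ∧
               (altScan cs codeL cs.length j k).2 < 4) := by
  intro j
  induction hj : cs.length - j using Nat.strong_induction_on generalizing j with
  | _ m ih =>
  intro k hjn hk
  by_cases hlt : j < cs.length
  · have hdrop : cs.drop j = cs[j] :: cs.drop (j + 1) := (List.getElem_cons_drop hlt).symm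
    have hkc : k < codeL.length := by simp only [codeL, List.length_cons, List.length_nil]; omega
    have hpat : codeL.drop k = codeL[k] :: codeL.drop (k + 1) := (List.getElem_cons_drop hkc).symm
    have hget : cs.getD j ' ' = cs[j] := List.getD_eq_getElem cs ' ' hlt
    have hgetp : codeL.getD k ' ' = codeL[k] := List.getD_eq_getElem codeL ' ' hkc
    rw [altScan, hdrop, hpat, firstEnd]
    simp only [hget, hgetp, hlt, hk, and_self, dif_pos]
    by_cases hc : cs[j] = codeL[k]
    · simp only [hc, beq_self_eq_true, if_true]
      by_cases hk4 : k + 1 = 4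
      · have hdone : codeL.drop (k + 1) = [] := by rw [hk4]; rfl
        rw [hdone]
        simp only [firstEnd, Option.map_some]
        rw [altScan]
        simp only [hk4]
        simp only [show ¬(j + 1 < cs.length ∧ 4 < 4) by omega, dif_neg, not_false_iff]
      · have hk1 : k + 1 < 4 := by omega
        have := ih (cs.length - (j + 1)) (by omega) (j + 1) rfl (k + 1) (by omega) hk1
        cases h : firstEnd (cs.drop (j + 1)) (codeL.drop (k + 1)) with
        | none => rw [h] at this; simpa using this
        | some e =>
          rw [h] at this
          simp only [Option.map_some]
          simpa [Nat.add_assoc, Nat.add_comm 1 e] using this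
    · have hbeq : (cs[j] == codeL[k]) = false := by simp [hc]
      simp only [hbeq, Bool.false_eq_true, if_false, if_neg hc]
      have := ih (cs.length - (j + 1)) (by omega) (j + 1) rfl k (by omega) hk
      rw [← hpat]
      cases h : firstEnd (cs.drop (j + 1)) (codeL.drop k) with
      | none => rw [h] at this; simpa using this
      | some e =>
        rw [h] at this
        simp only [Option.map_some]
        simpa [Nat.add_assoc, Nat.add_comm 1 e] using this
  · have hjn' : j = cs.length := by omega
    have hdrop : cs.drop j = [] := by rw [hjn']; simp
    have hpat : codeL.drop k ≠ [] := by
      have : k < codeL.length := by simp [codeL]; omega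
      simp [List.drop_eq_nil_iff]; simp [codeL] at this ⊢; omega
    rw [hdrop]
    rw [altScan]
    simp only [show ¬(j < cs.length ∧ k < 4) by omega, dif_neg, not_false_iff]
    cases hp : codeL.drop k with
    | nil => exact absurd hp hpat
    | cons a b => simp [firstEnd, hjn']; omega

-- counting over an Int range: no element reaches the threshold E
lemma foldl_thresh_none (E b : Int) (hb : b ≤ E) : ∀ (m : Nat) (a acc : Int), (b - a).toNat = m →
    (PySem.List.pyRange a b 1).foldl (fun acc e => if E ≤ e then acc + 1 else acc) acc = acc := by
  intro m
  induction m using Nat.strong_induction_on with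
  | _ m ih =>
    intro a acc hm
    by_cases hab : a < b
    · rw [PySem.List.pyRange_one_cons hab]
      simp only [List.foldl_cons]
      rw [if_neg (by omega)]
      exact ih ((b - (a + 1)).toNat) (by omega) (a + 1) acc rfl
    · rw [PySem.List.pyRange_one_eq_nil (by omega)]; rfl

-- counting over an Int range [a, b): the number of elements ≥ E is b - E, when a ≤ E ≤ b
lemma foldl_thresh (E : Int) : ∀ (m : Nat) (b a acc : Int), a ≤ E → E ≤ b → (b - E).toNat = m →
    (PySem.List.pyRange a b 1).foldl (fun acc e => if E ≤ e then acc + 1 else acc) acc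
      = acc + (b - E) := by
  intro m
  induction m using Nat.strong_induction_on with
  | _ m ih =>
    intro b a acc haE hEb hm
    by_cases hEb' : E < b
    · have hb1 : b = (b - 1) + 1 := by ring
      rw [hb1, PySem.List.pyRange_one_succ_right (by omega), List.foldl_append]
      simp only [List.foldl_cons, List.foldl_nil]
      rw [ih ((b - 1 - E).toNat) (by omega) (b - 1) a acc haE (by omega) rfl]
      rw [if_pos (by omega)]
      ring
    · have : E = b := by omega
      subst this
      rw [foldl_thresh_none E E le_rfl ((E - a).toNat) a acc rfl]
      simp

-- the two inner loops agree for every start position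
lemma inner_eq (s : String) (start : Nat) (hs : start < s.toList.length) (acc : Int) :
    (PySem.List.pyRange ((start : Int) + 1) ((s.toList.length : Int) + 1) 1).foldl
      (fun strength end_ =>
        if checkorder (PySem.Str.slice s (some (start : Int)) (some end_)) then strength + 1
        else strength) acc
    = (if (altScan s.toList "code".toList s.toList.length start 0).2 == 4 then
         acc + ((s.toList.length : Int) - ((altScan s.toList "code".toList s.toList.length start 0).1 : Int) + 1)
       else acc) := by
  have hpat : "code".toList = codeL := by rfl
  have hrev : codeL.reverse = ['e', 'd', 'o', 'c'] := by rfl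
  have hspec := altScan_spec s.toList start 0 (by omega) (by omega)
  have hck : ∀ (x : Int), (start : Int) + 1 ≤ x → x < (s.toList.length : Int) + 1 →
      checkorder (PySem.Str.slice s (some (start : Int)) (some x))
        = (firstEnd ((s.toList.drop start).take (x.toNat - start)) codeL).isSome := by
    intro x hx1 hx2
    unfold checkorder
    have hlist : (PySem.Str.slice s (some (start : Int)) (some x)).toList
        = PySem.List.slice s.toList (some (start : Int)) (some x) := by
      simp [PySem.Str.slice]
    rw [hlist, PySem.List.slice_toNat _ (by omega) (by omega)]
    rw [← hrev, checkorderGo_eq]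
    simp
  cases h : firstEnd (s.toList.drop start) codeL with
  | some e =>
    have he1 : 1 ≤ e := firstEnd_pos _ _ _ (by simp [codeL]) h
    have he2 : e ≤ (s.toList.drop start).length := firstEnd_le_length _ _ _ h
    simp only [List.length_drop] at he2
    -- A side becomes a threshold count with threshold start + e
    rw [PySem.List.foldl_congr_mem _ _
        (fun strength end_ => if ((start : Int) + (e : Int)) ≤ end_ then strength + 1 else strength) acc
        (by
          intro a x hx
          rw [PySem.List.mem_pyRange_one] at hx
          rw [hck x hx.1 hx.2, firstEnd_take, h]
          simp only [Option.bind_some]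
          by_cases hle : e ≤ x.toNat - start
          · simp [hle, show (start : Int) + (e : Int) ≤ x by omega]
          · simp [hle, show ¬((start : Int) + (e : Int) ≤ x) by omega])]
    rw [foldl_thresh ((start : Int) + (e : Int))
        (((s.toList.length : Int) + 1 - ((start : Int) + (e : Int))).toNat) _ _ acc
        (by omega) (by omega) rfl]
    -- B side
    rw [hpat] at *
    simp only [List.drop_zero, h] at hspec
    rw [hspec]
    simp only [beq_self_eq_true, if_true]
    push_cast
    ring
  | none =>
    rw [PySem.List.foldl_congr_mem _ _ (fun strength _ => strength) acc
        (by
          intro a x hx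
          rw [PySem.List.mem_pyRange_one] at hx
          rw [hck x hx.1 hx.2, firstEnd_take, h]
          simp)]
    rw [hpat] at *
    simp only [List.drop_zero, h] at hspec
    have h2 := hspec.2
    have hne : ((altScan s.toList codeL s.toList.length start 0).2 == 4) = false := by
      simp only [beq_eq_false_iff_ne, ne_eq]; omega
    rw [hne]
    simp

theorem gen_strength_eq_alt (s : String) : gen_strength s = gen_strength_alt s := by
  unfold gen_strength gen_strength_alt
  simp only [PySem.Str.len_eq, PySem.List.pyRange_zero_natCast, List.foldl_map]
  apply PySem.List.foldl_congr_mem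
  intro acc start hstart
  rw [List.mem_range] at hstart
  simpa using inner_eq s start hstart acc

-- ===== VERDICT (by name: the statement is the Claim_ definition above) =====
theorem gen_strength_spec : Claim_equal_gen_strength := by
  intro s _
  unfold Spec_gen_strength
  exact gen_strength_eq_alt s
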